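-- pv_equiv track=rewrite | github.com/Sigiriya123/recruitment | __init__.py | process_ol_rules
-- ===== SOURCE A (Python) =====
-- grade_mapping = {
--     'A': 75,
--     'B': 65,
--     'C': 55,
--     'S': 45,
--     'W': 30
-- }
--
-- def check_ol_rule(subject, required_grade, logic, normalized_results):
--     if subject not in normalized_results:
--         return False
--     actual_grade = normalized_results[subject]
--     return grade_mapping[actual_grade] >= grade_mapping[required_grade]
--
-- def process_ol_rules(ol_rules, normalized_results, OL_text):
--     output = {"Rules": []}
--     rule_satisfaction = {}
--     for rule in ol_rules:
--         subject, required_grade = rule["Entry"].split(' - ')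
--         rule_satisfaction[rule["Entry"]] = check_ol_rule(subject, required_grade, rule["Logic"], normalized_results)
--
--     for rule in ol_rules:
--         subject = rule["Entry"]
--         rule_status = "Fulfilled" if rule_satisfaction.get(subject, False) else "Not Fulfilled"
--         output_rule = {
--             "RuleType": "Qualification",
--             "Rule": rule["Rule"],
--             "Entry": subject,
--             "Logic": rule["Logic"],
--             "CorrespondingText": OL_text,
--             "RuleStatus": rule_status
--         }
--         output["Rules"].append(output_rule)
--
--     return output
-- ===== SOURCE B (Python) =====
-- grade_mapping = {
--     'A': 75,
--     'B': 65,
--     'C': 55,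
--     'S': 45,
--     'W': 30
-- }
--
-- def process_ol_rules(ol_rules, normalized_results, OL_text):
--     rules = []
--     for rule in ol_rules:
--         subject, required_grade = rule["Entry"].split(' - ')
--         satisfied = (subject in normalized_results and
--                      grade_mapping[normalized_results[subject]] >= grade_mapping[required_grade])
--         rules.append({
--             "RuleType": "Qualification",
--             "Rule": rule["Rule"],
--             "Entry": rule["Entry"],
--             "Logic": rule["Logic"],
--             "CorrespondingText": OL_text,
--             "RuleStatus": "Fulfilled" if satisfied else "Not Fulfilled",
--         })
--     return {"Rules": rules}
-- ===== Notes on version B (the rewrite author's own statement) =====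
-- stated objective: simpler
-- what changed: B is one single pass that evaluates each rule's grade check inline and appends the finished status dict immediately, eliminating A's separate rule_satisfaction index dict and its second loop.
import Mathlib
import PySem

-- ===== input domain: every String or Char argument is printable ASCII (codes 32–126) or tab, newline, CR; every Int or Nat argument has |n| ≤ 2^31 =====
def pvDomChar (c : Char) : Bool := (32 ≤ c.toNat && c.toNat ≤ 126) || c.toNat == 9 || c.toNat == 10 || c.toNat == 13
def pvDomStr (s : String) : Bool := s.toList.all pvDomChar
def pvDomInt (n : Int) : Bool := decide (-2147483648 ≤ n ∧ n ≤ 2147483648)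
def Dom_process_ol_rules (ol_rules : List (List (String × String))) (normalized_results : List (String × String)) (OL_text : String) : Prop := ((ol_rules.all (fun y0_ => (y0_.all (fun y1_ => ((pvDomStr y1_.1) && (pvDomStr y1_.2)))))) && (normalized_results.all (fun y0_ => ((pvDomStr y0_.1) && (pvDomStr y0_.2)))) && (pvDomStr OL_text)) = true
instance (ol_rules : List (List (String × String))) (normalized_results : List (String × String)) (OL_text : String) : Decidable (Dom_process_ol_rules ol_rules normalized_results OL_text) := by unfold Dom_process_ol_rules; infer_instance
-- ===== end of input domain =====

-- B replaces A's two passes (build a rule_satisfaction index dict, then a second loop reading it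
-- back) by a single pass that evaluates each rule inline and emits the finished dict at once
-- (objective: simpler).

-- ===== PORT A =====

-- module-level constant grade_mapping (dict literal; shared by both ports, as in the Python module)
def pvGradeMapping : PySem.Dict String Int :=
  PySem.Dict.ofList [("A", 75), ("B", 65), ("C", 55), ("S", 45), ("W", 30)]

-- dict lookup d[k] (first match); Python raises KeyError on a miss — those inputs are outside Pre_,
-- the total port returns the stated default there.
def pvItem (d : List (String × String)) (k : String) (dflt : String) : String :=
  ((d.find? (fun p => p.1 == k)).map (fun p => p.2)).getD dflt

def check_ol_rule (subject required_grade logic : String) (normalized_results : List (String × String)) : Bool :=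
  match (normalized_results.find? (fun p => p.1 == subject)).map (fun p => p.2) with
  | none => false
  | some actual_grade =>
      decide (PySem.Dict.getD pvGradeMapping actual_grade 0 ≥ PySem.Dict.getD pvGradeMapping required_grade 0)

def process_ol_rules (ol_rules : List (List (String × String))) (normalized_results : List (String × String)) (OL_text : String) : List (String × List (List (String × String))) :=
  -- first loop: build rule_satisfaction
  let rule_satisfaction : PySem.Dict String Bool :=
    ol_rules.foldl (fun d rule =>
      let entry := pvItem rule "Entry" ""
      let parts := ((PySem.Str.split? entry " - ").getD [])
      let subject := parts.getD 0 ""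
      let required_grade := parts.getD 1 ""
      PySem.Dict.insert d entry (check_ol_rule subject required_grade (pvItem rule "Logic" "") normalized_results))
      PySem.Dict.empty
  -- second loop: build output["Rules"]
  let rules : List (List (String × String)) :=
    ol_rules.foldl (fun acc rule =>
      let subject := pvItem rule "Entry" ""
      let rule_status := if PySem.Dict.getD rule_satisfaction subject false then "Fulfilled" else "Not Fulfilled"
      acc ++ [[("RuleType", "Qualification"),
               ("Rule", pvItem rule "Rule" ""),
               ("Entry", subject),
               ("Logic", pvItem rule "Logic" ""),
               ("CorrespondingText", OL_text),
               ("RuleStatus", rule_status)]]) []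
  [("Rules", rules)]

-- ===== PORT B =====

def process_ol_rules_alt (ol_rules : List (List (String × String))) (normalized_results : List (String × String)) (OL_text : String) : List (String × List (List (String × String))) :=
  [("Rules",
    ol_rules.map (fun rule =>
      let parts := ((PySem.Str.split? (pvItem rule "Entry" "") " - ").getD [])
      let subject := parts.getD 0 ""
      let required_grade := parts.getD 1 ""
      let satisfied :=
        match (normalized_results.find? (fun p => p.1 == subject)).map (fun p => p.2) with
        | none => false
        | some g => decide (PySem.Dict.getD pvGradeMapping g 0 ≥ PySem.Dict.getD pvGradeMapping required_grade 0)
      [("RuleType", "Qualification"),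
       ("Rule", pvItem rule "Rule" ""),
       ("Entry", pvItem rule "Entry" ""),
       ("Logic", pvItem rule "Logic" ""),
       ("CorrespondingText", OL_text),
       ("RuleStatus", if satisfied then "Fulfilled" else "Not Fulfilled")]))]

-- ===== PRECONDITION & SPEC =====

-- per-rule checks: the three keys exist, the Entry splits into exactly two parts, and when the
-- subject is found in normalized_results both grades are keys of grade_mapping (otherwise the
-- Python raises KeyError / ValueError); Pre_ excludes exactly the inputs where A raises.
def pvRuleOk (rule : List (String × String)) (normalized_results : List (String × String)) : Bool :=
  (rule.find? (fun p => p.1 == "Entry")).isSome &&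
  (rule.find? (fun p => p.1 == "Logic")).isSome &&
  (rule.find? (fun p => p.1 == "Rule")).isSome &&
  (let parts := ((PySem.Str.split? (pvItem rule "Entry" "") " - ").getD [])
   parts.length == 2 &&
   (match (normalized_results.find? (fun p => p.1 == parts.getD 0 "")).map (fun p => p.2) with
    | none => true
    | some g => (PySem.Dict.get? pvGradeMapping g).isSome &&
                (PySem.Dict.get? pvGradeMapping (parts.getD 1 "")).isSome))

def Pre_process_ol_rules (ol_rules : List (List (String × String))) (normalized_results : List (String × String)) (OL_text : String) : Prop :=
  ∀ rule ∈ ol_rules, pvRuleOk rule normalized_results = true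
instance (ol_rules : List (List (String × String))) (normalized_results : List (String × String)) (OL_text : String) : Decidable (Pre_process_ol_rules ol_rules normalized_results OL_text) := by unfold Pre_process_ol_rules; infer_instance

def pvWitness_process_ol_rules : (List (List (String × String))) × (List (String × String)) × String :=
  ([[("Entry", "Maths - C"), ("Logic", "AND"), ("Rule", "r1")],
    [("Entry", "Sci - B"), ("Logic", "OR"), ("Rule", "r2")]],
   [("Maths", "A"), ("Sci", "S")], "ol")

def Spec_process_ol_rules (ol_rules : List (List (String × String))) (normalized_results : List (String × String)) (OL_text : String) (out : List (String × List (List (String × String)))) : Prop := out = process_ol_rules_alt ol_rules normalized_results OL_text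
instance (ol_rules : List (List (String × String))) (normalized_results : List (String × String)) (OL_text : String) (out : List (String × List (List (String × String)))) : Decidable (Spec_process_ol_rules ol_rules normalized_results OL_text out) := by unfold Spec_process_ol_rules; infer_instance

-- ===== CLAIM (what is proved, stated in full; the proofs are below) =====
def Claim_equal_process_ol_rules : Prop := ∀ (ol_rules : List (List (String × String))) (normalized_results : List (String × String)) (OL_text : String), Dom_process_ol_rules ol_rules normalized_results OL_text → Pre_process_ol_rules ol_rules normalized_results OL_text → Spec_process_ol_rules ol_rules normalized_results OL_text (process_ol_rules ol_rules normalized_results OL_text)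

-- ===== LEMMAS AND PROOFS =====

-- the value A's first loop stores for an entry string: a function of the entry alone
def pvSatOf (entry : String) (normalized_results : List (String × String)) : Bool :=
  let parts := ((PySem.Str.split? entry " - ").getD [])
  check_ol_rule (parts.getD 0 "") (parts.getD 1 "") "" normalized_results

-- check_ol_rule ignores its logic argument
theorem check_ol_rule_logic (subject required_grade l l' : String) (nr : List (String × String)) :
    check_ol_rule subject required_grade l nr = check_ol_rule subject required_grade l' nr := rfl

-- after the first loop, looking up any entry occurring in the remaining list gives pvSatOf of it;
-- entries not in the list keep their prior value
theorem sat_build (nr : List (String × String)) :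
    ∀ (l : List (List (String × String))) (d : PySem.Dict String Bool) (e : String),
      PySem.Dict.getD
        (l.foldl (fun d rule =>
          let entry := pvItem rule "Entry" ""
          let parts := ((PySem.Str.split? entry " - ").getD [])
          PySem.Dict.insert d entry (check_ol_rule (parts.getD 0 "") (parts.getD 1 "") (pvItem rule "Logic" "") nr)) d)
        e false
      = if e ∈ l.map (fun rule => pvItem rule "Entry" "") then pvSatOf e nr
        else PySem.Dict.getD d e false := by
  intro l
  induction l with
  | nil => intro d e; simp
  | cons r rs ih =>
    intro d e
    simp only [List.foldl_cons, ih, List.map_cons, List.mem_cons]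
    by_cases hmem : e ∈ rs.map (fun rule => pvItem rule "Entry" "")
    · simp [hmem]
    · by_cases he : e = pvItem r "Entry" ""
      · subst he
        simp [hmem, PySem.Dict.getD, PySem.Dict.get?_insert_self, pvSatOf,
              check_ol_rule_logic _ _ (pvItem r "Logic" "") "" nr]
      · simp [hmem, he, PySem.Dict.getD, PySem.Dict.get?_insert_of_ne _ _ he]

-- A's second loop, given the satisfaction lookup already agrees with pvSatOf on every entry of the
-- list, equals B's single map (with an accumulator)
theorem second_loop (nr : List (String × String)) (OL_text : String)
    (sat : PySem.Dict String Bool)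
    (l : List (List (String × String)))
    (hsat : ∀ rule ∈ l, PySem.Dict.getD sat (pvItem rule "Entry" "") false
              = pvSatOf (pvItem rule "Entry" "") nr) :
    ∀ acc : List (List (String × String)),
      (l.foldl (fun acc rule =>
        let subject := pvItem rule "Entry" ""
        let rule_status := if PySem.Dict.getD sat subject false then "Fulfilled" else "Not Fulfilled"
        acc ++ [[("RuleType", "Qualification"),
                 ("Rule", pvItem rule "Rule" ""),
                 ("Entry", subject),
                 ("Logic", pvItem rule "Logic" ""),
                 ("CorrespondingText", OL_text),
                 ("RuleStatus", rule_status)]]) acc)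
      = acc ++ l.map (fun rule =>
          let parts := ((PySem.Str.split? (pvItem rule "Entry" "") " - ").getD [])
          let subject := parts.getD 0 ""
          let required_grade := parts.getD 1 ""
          let satisfied :=
            match (nr.find? (fun p => p.1 == subject)).map (fun p => p.2) with
            | none => false
            | some g => decide (PySem.Dict.getD pvGradeMapping g 0 ≥ PySem.Dict.getD pvGradeMapping required_grade 0)
          [("RuleType", "Qualification"),
           ("Rule", pvItem rule "Rule" ""),
           ("Entry", pvItem rule "Entry" ""),
           ("Logic", pvItem rule "Logic" ""),
           ("CorrespondingText", OL_text),
           ("RuleStatus", if satisfied then "Fulfilled" else "Not Fulfilled")]) := by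
  induction l with
  | nil => intro acc; simp
  | cons r rs ih =>
    intro acc
    have hr := hsat r (by simp)
    have hrs : ∀ rule ∈ rs, PySem.Dict.getD sat (pvItem rule "Entry" "") false
        = pvSatOf (pvItem rule "Entry" "") nr := fun rule hm => hsat rule (by simp [hm])
    simp only [List.foldl_cons, List.map_cons, ih hrs]
    rw [hr]
    simp [pvSatOf, check_ol_rule, List.append_assoc]

-- ===== VERDICT (by name: the statement is the Claim_ definition above) =====
theorem process_ol_rules_spec : Claim_equal_process_ol_rules := by
  intro ol_rules nr OL_text _hdom _hpre
  unfold Spec_process_ol_rules process_ol_rules process_ol_rules_alt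
  have hsat : ∀ rule ∈ ol_rules,
      PySem.Dict.getD
        (ol_rules.foldl (fun d rule =>
          let entry := pvItem rule "Entry" ""
          let parts := ((PySem.Str.split? entry " - ").getD [])
          PySem.Dict.insert d entry (check_ol_rule (parts.getD 0 "") (parts.getD 1 "") (pvItem rule "Logic" "") nr))
          PySem.Dict.empty)
        (pvItem rule "Entry" "") false
      = pvSatOf (pvItem rule "Entry" "") nr := by
    intro rule hm
    rw [sat_build nr ol_rules PySem.Dict.empty (pvItem rule "Entry" "")]
    have hmem : pvItem rule "Entry" "" ∈ ol_rules.map (fun rule => pvItem rule "Entry" "") :=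
      List.mem_map_of_mem hm
    simp [hmem]
  simpa using second_loop nr OL_text _ ol_rules hsat []
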